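-- pv_equiv track=rewrite | github.com/MrBrantCode/unitest_baseline | mut_generate/mist_train_cf/cf_95273/solution.py | count_even_before_odd
-- ===== SOURCE A (Python) =====
-- def count_even_before_odd(arr):
--     count_even = 0
--     found_odd = False
--
--     for num in arr:
--         if num % 2 == 0:
--             if not found_odd:
--                 count_even += 1
--         else:
--             found_odd = True
--
--     return count_even
-- ===== SOURCE B (Python) =====
-- def count_even_before_odd(arr):
--     parities = [num % 2 for num in arr]
--     return parities.index(1) if 1 in parities else len(parities)
-- ===== Notes on version B (the rewrite author's own statement) =====
-- stated objective: alternative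
-- what changed: Replaces A's single flag-tracking accumulator loop with building a parity table and locating the first odd via list.index / membership, so the count is the index of the first 1 in the table.
import Mathlib
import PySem

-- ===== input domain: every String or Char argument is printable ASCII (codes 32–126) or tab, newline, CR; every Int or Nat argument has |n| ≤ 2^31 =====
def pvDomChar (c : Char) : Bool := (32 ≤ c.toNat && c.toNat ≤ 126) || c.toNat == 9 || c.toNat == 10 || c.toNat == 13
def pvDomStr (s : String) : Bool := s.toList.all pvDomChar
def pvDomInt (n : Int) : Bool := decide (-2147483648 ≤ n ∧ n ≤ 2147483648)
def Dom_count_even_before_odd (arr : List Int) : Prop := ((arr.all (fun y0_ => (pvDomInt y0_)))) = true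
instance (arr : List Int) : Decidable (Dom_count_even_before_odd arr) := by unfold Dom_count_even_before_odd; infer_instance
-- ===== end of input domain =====

-- B replaces A's single flag-tracking pass with a parity table plus first-index lookup (alternative decomposition, same cost).


-- ===== PORT A =====
-- Port of A: one pass keeping (count_even, found_odd).
def count_even_before_odd (arr : List Int) : Int :=
  (arr.foldl (fun (s : Int × Bool) num =>
      if PySem.Int.mod num 2 = 0 then
        (if s.2 = false then (s.1 + 1, s.2) else s)
      else (s.1, true)) (0, false)).1

-- ===== PORT B =====
-- Port of B: build the parity table, then the answer is the index of the first 1 (or the length).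
def count_even_before_odd_alt (arr : List Int) : Int :=
  let parities := arr.map (fun num => PySem.Int.mod num 2)
  if 1 ∈ parities then
    match PySem.List.index? parities 1 with
    | some i => (i : Int)
    | none => (parities.length : Int)
  else (parities.length : Int)

-- ===== PRECONDITION & SPEC =====
def Spec_count_even_before_odd (arr : List Int) (out : Int) : Prop := out = count_even_before_odd_alt arr
instance (arr : List Int) (out : Int) : Decidable (Spec_count_even_before_odd arr out) := by unfold Spec_count_even_before_odd; infer_instance

-- ===== CLAIM (what is proved, stated in full; the proofs are below) =====
def Claim_equal_count_even_before_odd : Prop := ∀ (arr : List Int), Dom_count_even_before_odd arr → Spec_count_even_before_odd arr (count_even_before_odd arr)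

-- ===== LEMMAS AND PROOFS =====

-- ===== VERDICT (by name: the statement is the Claim_ definition above) =====
-- A's fold from a found_odd = true state is the identity.
theorem foldA_true (arr : List Int) (c : Int) :
    arr.foldl (fun (s : Int × Bool) num =>
      if PySem.Int.mod num 2 = 0 then
        (if s.2 = false then (s.1 + 1, s.2) else s)
      else (s.1, true)) (c, true) = (c, true) := by
  induction arr generalizing c with
  | nil => rfl
  | cons x xs ih => simp only [List.foldl_cons]; split_ifs <;> simp_all

-- Python's % on a positive divisor gives a residue in [0, 2).
theorem pymod_two (x : Int) : PySem.Int.mod x 2 = 0 ∨ PySem.Int.mod x 2 = 1 := by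
  have h1 := PySem.Int.mod_nonneg (a := x) (b := 2) (by norm_num)
  have h2 := PySem.Int.mod_lt (a := x) (b := 2) (by norm_num)
  omega

-- B on an even-headed list: one more than B on the tail.
theorem alt_cons_even (x : Int) (xs : List Int) (h0 : PySem.Int.mod x 2 = 0) :
    count_even_before_odd_alt (x :: xs) = 1 + count_even_before_odd_alt xs := by
  simp only [count_even_before_odd_alt, List.map_cons, h0,
    PySem.List.index?_eq_idxOf?, List.idxOf?_cons, List.mem_cons]
  cases hidx : List.idxOf? 1 (List.map (fun num => PySem.Int.mod num 2) xs) with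
  | none =>
    have hmem : (1 : Int) ∉ List.map (fun num => PySem.Int.mod num 2) xs :=
      List.idxOf?_eq_none_iff.1 hidx
    rw [if_neg (fun h => h.elim (by decide) hmem), if_neg hmem]
    simp only [List.length_cons]
    push_cast; ring
  | some k =>
    have hmem : (1 : Int) ∈ List.map (fun num => PySem.Int.mod num 2) xs :=
      List.isSome_idxOf?.1 (by rw [hidx]; rfl)
    rw [if_pos (Or.inr hmem), if_pos hmem]
    simp only [show ((0 : Int) == 1) = false by decide, Bool.false_eq_true,
      if_false, Option.map_some]
    push_cast; ring

-- B on an odd-headed list is 0.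
theorem alt_cons_odd (x : Int) (xs : List Int) (h1 : PySem.Int.mod x 2 = 1) :
    count_even_before_odd_alt (x :: xs) = 0 := by
  simp only [count_even_before_odd_alt, List.map_cons, h1,
    PySem.List.index?_eq_idxOf?, List.idxOf?_cons, List.mem_cons]
  rw [if_pos (Or.inl trivial)]
  simp

-- From a not-yet-found state A's count grows by exactly B's answer for the rest.
theorem foldA_false (arr : List Int) (c : Int) :
    (arr.foldl (fun (s : Int × Bool) num =>
      if PySem.Int.mod num 2 = 0 then
        (if s.2 = false then (s.1 + 1, s.2) else s)
      else (s.1, true)) (c, false)).1 = c + count_even_before_odd_alt arr := by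
  induction arr generalizing c with
  | nil => simp [count_even_before_odd_alt]
  | cons x xs ih =>
    simp only [List.foldl_cons]
    rcases pymod_two x with h0 | h1
    · rw [if_pos h0]
      simp only [if_true]
      rw [ih, alt_cons_even x xs h0]
      ring
    · rw [if_neg (by omega), foldA_true, alt_cons_odd x xs h1]
      simp

theorem count_even_before_odd_spec : Claim_equal_count_even_before_odd := by
  intro arr _
  unfold Spec_count_even_before_odd count_even_before_odd
  have := foldA_false arr 0
  omega
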